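-- pv_equiv track=rewrite | github.com/FanaticsKang/auto_test_gen | skills/unit-test-gen-init/scripts/scan_repo.py | _split_qualified_by_scope
-- ===== SOURCE A (Python) =====
-- def _split_qualified_by_scope(text: str) -> list[str]:
--     cleaned = []
--     depth = 0
--     for ch in text:
--         if ch == "<":
--             depth += 1
--         elif ch == ">":
--             depth = max(0, depth - 1)
--         elif depth == 0:
--             cleaned.append(ch)
--     clean_text = "".join(cleaned)
--     return [p for p in clean_text.split("::") if p]
-- ===== SOURCE B (Python) =====
-- def _split_qualified_by_scope(text: str) -> list[str]:
--     parts = []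
--     cur = []
--     depth = 0
--     prev_colon = False
--     for ch in text:
--         if ch == "<":
--             depth += 1
--         elif ch == ">":
--             depth = max(0, depth - 1)
--         elif depth == 0:
--             if ch == ":" and prev_colon:
--                 cur.pop()
--                 parts.append("".join(cur))
--                 cur = []
--                 prev_colon = False
--             elif ch == ":":
--                 cur.append(ch)
--                 prev_colon = True
--             else:
--                 cur.append(ch)
--                 prev_colon = False
--     parts.append("".join(cur))
--     return [p for p in parts if p]
-- ===== Notes on version B (the rewrite author's own statement) =====
-- stated objective: alternative
-- what changed: A builds an intermediate cleaned string and then splits it on the double-colon delimiter and filters; B is one streaming pass that fuses cleaning and splitting, maintaining a current-segment buffer and a pending-colon flag and emitting segments on the fly.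
import Mathlib
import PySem

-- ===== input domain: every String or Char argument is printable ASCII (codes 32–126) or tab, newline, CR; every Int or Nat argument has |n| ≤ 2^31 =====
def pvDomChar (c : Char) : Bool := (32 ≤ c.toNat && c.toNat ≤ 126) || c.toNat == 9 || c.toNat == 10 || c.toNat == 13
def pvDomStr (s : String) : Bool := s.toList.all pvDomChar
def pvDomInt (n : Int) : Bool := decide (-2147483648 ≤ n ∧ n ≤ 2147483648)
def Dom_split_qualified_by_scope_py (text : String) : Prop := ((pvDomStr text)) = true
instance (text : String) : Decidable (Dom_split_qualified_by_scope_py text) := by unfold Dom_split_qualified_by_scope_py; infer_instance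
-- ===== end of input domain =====

-- B fuses A's two passes (build the cleaned string, then split on "::" and filter)
-- into one streaming pass over the text with a current-segment buffer and a
-- pending-colon flag, building no intermediate cleaned string; objective: alternative.

-- ===== PORT A =====
-- literal port of A: a loop building `cleaned`/`depth`, then "".join, .split("::"), filter truthy
def split_qualified_by_scope_py (text : String) : List String :=
  let st := text.toList.foldl
    (fun (st : List Char × Int) ch =>
      if ch = '<' then (st.1, st.2 + 1)
      else if ch = '>' then (st.1, max 0 (st.2 - 1))
      else if st.2 = 0 then (st.1 ++ [ch], st.2)
      else st)
    ([], 0)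
  let cleanText : String := String.ofList st.1
  ((PySem.Chars.splitOn cleanText.toList [':', ':']).map String.ofList).filter (· ≠ "")


-- ===== PORT B =====
-- literal port of B: one fold carrying (parts, cur, depth, prev_colon), then append final cur and filter
def split_qualified_by_scope_py_alt (text : String) : List String :=
  let st := text.toList.foldl
    (fun (st : List String × List Char × Int × Bool) ch =>
      let (parts, cur, depth, prev) := st
      if ch = '<' then (parts, cur, depth + 1, prev)
      else if ch = '>' then (parts, cur, max 0 (depth - 1), prev)
      else if depth = 0 then
        (if ch = ':' ∧ prev = true then (parts ++ [String.ofList cur.dropLast], ([] : List Char), depth, false)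
         else if ch = ':' then (parts, cur ++ [ch], depth, true)
         else (parts, cur ++ [ch], depth, false))
      else st)
    ([], [], 0, false)
  (st.1 ++ [String.ofList st.2.1]).filter (· ≠ "")


-- ===== PRECONDITION & SPEC =====
def Spec_split_qualified_by_scope_py (text : String) (out : List String) : Prop := out = split_qualified_by_scope_py_alt text
instance (text : String) (out : List String) : Decidable (Spec_split_qualified_by_scope_py text out) := by unfold Spec_split_qualified_by_scope_py; infer_instance

-- ===== CLAIM (what is proved, stated in full; the proofs are below) =====
def Claim_equal_split_qualified_by_scope_py : Prop := ∀ (text : String), Dom_split_qualified_by_scope_py text → Spec_split_qualified_by_scope_py text (split_qualified_by_scope_py text)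

-- ===== LEMMAS AND PROOFS =====

-- the cleaned character stream (chars outside angle brackets), starting at depth d
def pvClean : List Char → Int → List Char
  | [], _ => []
  | c :: t, d =>
    if c = '<' then pvClean t (d + 1)
    else if c = '>' then pvClean t (max 0 (d - 1))
    else if d = 0 then c :: pvClean t d
    else pvClean t d


-- left-to-right greedy split on "::", with the current partial segment as accumulator
def pvSplit : List Char → List Char → List (List Char)
  | cur, [] => [cur]
  | cur, ':' :: ':' :: t => cur :: pvSplit [] t
  | cur, c :: t => pvSplit (cur ++ [c]) t


-- the depth-free splitting step of B
def pvStepS : (List String × List Char × Bool) → Char → (List String × List Char × Bool)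
  | (parts, cur, prev), c =>
    if c = ':' ∧ prev = true then (parts ++ [String.ofList cur.dropLast], [], false)
    else if c = ':' then (parts, cur ++ [c], true)
    else (parts, cur ++ [c], false)


theorem pvSplit_cons_ne (cur : List Char) (c : Char) (t : List Char) (h : c ≠ ':') :
    pvSplit cur (c :: t) = pvSplit (cur ++ [c]) t := by
  rw [pvSplit.eq_def]
  cases t with
  | nil => simp [h]
  | cons b tb => simp [h]


theorem pvSplit_colon_nil (cur : List Char) : pvSplit cur [':'] = [cur ++ [':']] := by
  rw [pvSplit.eq_def]; simp [pvSplit]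


theorem pvSplit_colon_ne (cur : List Char) (c : Char) (t : List Char) (h : c ≠ ':') :
    pvSplit cur (':' :: c :: t) = pvSplit (cur ++ [':', c]) t := by
  rw [pvSplit.eq_def]
  simp [h, pvSplit_cons_ne _ _ _ h]


theorem pvSplit_colon2 (cur : List Char) (t : List Char) :
    pvSplit cur (':' :: ':' :: t) = cur :: pvSplit [] t := by simp [pvSplit]


theorem go_eq_pvSplit : ∀ (fuel : ℕ) (l cur : List Char) (acc : List (List Char)),
    l.length < fuel →
    PySem.Chars.splitOn.go [':', ':'] fuel l cur acc = acc.reverse ++ pvSplit cur.reverse l := by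
  intro fuel
  induction fuel with
  | zero => intro l cur acc h; omega
  | succ n ih =>
    intro l cur acc h
    cases l with
    | nil => simp [PySem.Chars.splitOn.go, pvSplit]
    | cons c rest =>
      rw [PySem.Chars.splitOn.go]
      by_cases hp : List.isPrefixOf [':', ':'] (c :: rest) = true
      · obtain ⟨hc, t, ht⟩ : c = ':' ∧ ∃ t, rest = ':' :: t := by
          cases rest with
          | nil => simp [List.isPrefixOf] at hp
          | cons b tb => simp [List.isPrefixOf] at hp; exact ⟨hp.1.symm, tb, by simp [hp.2.symm]⟩
        subst hc; subst ht
        simp only [hp, if_true]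
        rw [ih _ _ _ (by simp at h ⊢; omega)]
        simp [pvSplit_colon2]
      · simp only [hp, if_false, Bool.false_eq_true]
        rw [ih _ _ _ (by simp at h ⊢; omega)]
        have hr : (c :: cur).reverse = cur.reverse ++ [c] := by simp
        rw [hr]
        -- not a prefix: either c ≠ ':' or rest does not start with ':'
        by_cases hc : c = ':'
        · subst hc
          cases rest with
          | nil => rw [pvSplit_colon_nil]; simp [pvSplit]
          | cons b tb =>
            have hb : b ≠ ':' := by
              intro hb; subst hb; simp [List.isPrefixOf] at hp
            rw [pvSplit_colon_ne _ _ _ hb, pvSplit_cons_ne _ _ _ hb]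
            simp
        · rw [pvSplit_cons_ne _ _ _ hc]


theorem splitOn_eq_pvSplit (cs : List Char) :
    PySem.Chars.splitOn cs [':', ':'] = pvSplit [] cs := by
  have := go_eq_pvSplit (cs.length + 1) cs [] [] (by omega)
  simpa [PySem.Chars.splitOn] using this


theorem foldA_eq (cs : List Char) : ∀ (cleaned : List Char) (d : Int),
    (List.foldl
      (fun (st : List Char × Int) ch =>
        if ch = '<' then (st.1, st.2 + 1)
        else if ch = '>' then (st.1, max 0 (st.2 - 1))
        else if st.2 = 0 then (st.1 ++ [ch], st.2)
        else st)
      (cleaned, d) cs).1 = cleaned ++ pvClean cs d := by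
  induction cs with
  | nil => intro cleaned d; simp [pvClean]
  | cons c t ih =>
    intro cleaned d
    rw [pvClean]
    by_cases h1 : c = '<'
    · simp [h1, ih]
    · by_cases h2 : c = '>'
      · simp [h1, h2, ih]
      · by_cases h3 : d = 0
        · simp [h1, h2, h3, ih]
        · simp [h1, h2, h3, ih]


theorem foldB_eq (cs : List Char) : ∀ (parts : List String) (cur : List Char) (d : Int) (prev : Bool),
    ∃ d' : Int,
    (List.foldl
      (fun (st : List String × List Char × Int × Bool) ch =>
        let (parts, cur, depth, prev) := st
        if ch = '<' then (parts, cur, depth + 1, prev)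
        else if ch = '>' then (parts, cur, max 0 (depth - 1), prev)
        else if depth = 0 then
          (if ch = ':' ∧ prev = true then (parts ++ [String.ofList cur.dropLast], ([] : List Char), depth, false)
           else if ch = ':' then (parts, cur ++ [ch], depth, true)
           else (parts, cur ++ [ch], depth, false))
        else st)
      (parts, cur, d, prev) cs) =
    ((List.foldl pvStepS (parts, cur, prev) (pvClean cs d)).1,
     (List.foldl pvStepS (parts, cur, prev) (pvClean cs d)).2.1, d',
     (List.foldl pvStepS (parts, cur, prev) (pvClean cs d)).2.2) := by
  induction cs with
  | nil => intro parts cur d prev; exact ⟨d, by simp [pvClean]⟩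
  | cons c t ih =>
    intro parts cur d prev
    rw [pvClean]
    by_cases h1 : c = '<'
    · obtain ⟨d', hd⟩ := ih parts cur (d + 1) prev
      exact ⟨d', by simp only [List.foldl_cons, h1, if_true]; simpa using hd⟩
    · by_cases h2 : c = '>'
      · obtain ⟨d', hd⟩ := ih parts cur (max 0 (d - 1)) prev
        refine ⟨d', ?_⟩
        simp only [List.foldl_cons, h1, h2, if_true, if_false]
        simpa [h1] using hd
      · by_cases h3 : d = 0
        · subst h3
          by_cases h4 : c = ':' ∧ prev = true
          · obtain ⟨d', hd⟩ := ih (parts ++ [String.ofList cur.dropLast]) [] 0 false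
            refine ⟨d', ?_⟩
            simp only [List.foldl_cons, h1, h2, h4, if_true, if_false]
            simpa [h1, h2, h4, pvStepS] using hd
          · by_cases h5 : c = ':'
            · have hp : prev = false := by
                cases prev
                · rfl
                · exact absurd ⟨h5, rfl⟩ h4
              subst hp
              obtain ⟨d', hd⟩ := ih parts (cur ++ [c]) 0 true
              refine ⟨d', ?_⟩
              simp only [List.foldl_cons, h1, h2, h4, h5, if_true, if_false]
              simpa [h1, h2, h4, h5, pvStepS] using hd
            · obtain ⟨d', hd⟩ := ih parts (cur ++ [c]) 0 false
              refine ⟨d', ?_⟩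
              simp only [List.foldl_cons, h1, h2, h4, h5, if_true, if_false]
              simpa [h1, h2, h4, h5, pvStepS] using hd
        · obtain ⟨d', hd⟩ := ih parts cur d prev
          refine ⟨d', ?_⟩
          simp only [List.foldl_cons, h1, h2, h3, if_false]
          simpa [h1, h2, h3] using hd


theorem foldS_eq : ∀ (n : ℕ) (cs : List Char), cs.length = n → ∀ (parts : List String) (cur : List Char),
    (List.foldl pvStepS (parts, cur, false) cs).1 ++
      [String.ofList (List.foldl pvStepS (parts, cur, false) cs).2.1] =
    parts ++ (pvSplit cur cs).map String.ofList := by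
  intro n
  induction n using Nat.strong_induction_on with
  | _ n ih =>
    intro cs hn parts cur
    cases cs with
    | nil => simp [pvSplit]
    | cons c t =>
      by_cases hc : c = ':'
      · subst hc
        cases t with
        | nil => rw [pvSplit_colon_nil]; simp [pvStepS]
        | cons b tb =>
          by_cases hb : b = ':'
          · subst hb
            rw [pvSplit_colon2]
            have h1 : List.foldl pvStepS (parts, cur, false) (':' :: ':' :: tb) =
                List.foldl pvStepS (parts ++ [String.ofList cur], [], false) tb := by
              simp [pvStepS]
            rw [h1, ih tb.length (by simp [← hn]) tb rfl]
            simp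
          · rw [pvSplit_colon_ne _ _ _ hb]
            have h1 : List.foldl pvStepS (parts, cur, false) (':' :: b :: tb) =
                List.foldl pvStepS (parts, cur ++ [':', b], false) tb := by
              simp [pvStepS, hb]
            rw [h1, ih tb.length (by simp [← hn]) tb rfl]
      · rw [pvSplit_cons_ne _ _ _ hc]
        have h1 : List.foldl pvStepS (parts, cur, false) (c :: t) =
            List.foldl pvStepS (parts, cur ++ [c], false) t := by
          simp [pvStepS, hc]
        rw [h1, ih t.length (by simp [← hn]) t rfl]


theorem ports_eq (text : String) :
    split_qualified_by_scope_py text = split_qualified_by_scope_py_alt text := by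
  simp only [split_qualified_by_scope_py, split_qualified_by_scope_py_alt]
  obtain ⟨d', hB⟩ := foldB_eq text.toList [] [] 0 false
  rw [hB, foldA_eq, String.toList_ofList, splitOn_eq_pvSplit]
  have hS := foldS_eq (pvClean text.toList 0).length (pvClean text.toList 0) rfl [] []
  simp only [List.nil_append] at hS ⊢
  rw [← hS]

-- ===== VERDICT (by name: the statement is the Claim_ definition above) =====
theorem split_qualified_by_scope_py_spec : Claim_equal_split_qualified_by_scope_py := by
  intro text _
  unfold Spec_split_qualified_by_scope_py
  exact ports_eq text
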